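-- pv_equiv track=rewrite | github.com/rrroooyyywang/SparseAttentionInfer | sparse_llm/common/benchmark/perplexity.py | _iter_same_length_batches
-- ===== SOURCE A (Python) =====
-- def _iter_same_length_batches(examples: list[dict], batch_size: int):
--     idx = 0
--     while idx < len(examples):
--         current_len = examples[idx]["length"]
--         batch = [examples[idx]]
--         idx += 1
--         while (
--             idx < len(examples)
--             and len(batch) < batch_size
--             and examples[idx]["length"] == current_len
--         ):
--             batch.append(examples[idx])
--             idx += 1
--         yield batch
-- ===== SOURCE B (Python) =====
-- def _iter_same_length_batches(examples: list[dict], batch_size: int):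
--     # Phase 1: collect the maximal consecutive runs of equal "length".
--     runs = []
--     current = []
--     for ex in examples:
--         if current and current[0]["length"] == ex["length"]:
--             current.append(ex)
--         else:
--             if current:
--                 runs.append(current)
--             current = [ex]
--     if current:
--         runs.append(current)
--     # Phase 2: slice each run into batches of batch_size.
--     for run in runs:
--         for i in range(0, len(run), batch_size):
--             yield run[i:i + batch_size]
-- ===== Notes on version B (the rewrite author's own statement) =====
-- stated objective: alternative
-- what changed: A's single fused index-walk (inner while extends the current batch while index, size and length allow) is replaced by two phases: first accumulate the maximal consecutive runs of equal 'length', then slice each run into batch_size chunks.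
-- outside the precondition, e.g. on _iter_same_length_batches([{'length': 1}], 0): A returns [[{'length': 1}]], B raises ValueError; on _iter_same_length_batches([{'length': 1}], -1): A returns [[{'length': 1}]], B returns []
import Mathlib
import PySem

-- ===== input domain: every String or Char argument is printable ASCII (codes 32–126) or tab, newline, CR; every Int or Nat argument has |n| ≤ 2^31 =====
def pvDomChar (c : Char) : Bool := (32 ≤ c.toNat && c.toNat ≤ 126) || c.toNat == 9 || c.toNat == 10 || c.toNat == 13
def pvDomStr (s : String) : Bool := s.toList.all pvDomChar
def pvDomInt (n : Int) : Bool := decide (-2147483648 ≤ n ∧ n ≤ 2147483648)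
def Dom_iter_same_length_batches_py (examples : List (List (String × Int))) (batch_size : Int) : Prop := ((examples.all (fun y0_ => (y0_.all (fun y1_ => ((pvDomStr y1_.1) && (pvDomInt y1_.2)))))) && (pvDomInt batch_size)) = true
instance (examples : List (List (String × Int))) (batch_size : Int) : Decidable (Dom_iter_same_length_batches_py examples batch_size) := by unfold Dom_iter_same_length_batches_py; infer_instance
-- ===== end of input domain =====

-- B replaces A's fused index-walk by two phases (collect maximal equal-"length" runs, then slice
-- each run into batch_size chunks): an alternative decomposition, equivalent for batch_size ≥ 1.

-- ===== PORT A =====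
-- e["length"]: the dict holds the LAST value bound to a key (dict built from pairs),
-- so the association-list lookup reads the last matching pair
def getLenPy (e : List (String × Int)) : Option Int :=
  (e.reverse.find? (fun kv => kv.1 == "length")).map (·.2)

-- inner while loop of A: extends `batch` while the index is in range, len(batch) < batch_size
-- and the next example has the current length; returns (batch, remaining examples)
def innerA (bs : Int) (cl : Option Int) (batch : List (List (String × Int))) :
    List (List (String × Int)) → List (List (String × Int)) × List (List (String × Int))
  | [] => (batch, [])
  | x :: r =>
      if (batch.length : Int) < bs ∧ getLenPy x = cl then innerA bs cl (batch ++ [x]) r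
      else (batch, x :: r)

-- termination measure for the outer loop
theorem innerA_snd_le (bs : Int) (cl : Option Int) :
    ∀ (r batch : List (List (String × Int))), (innerA bs cl batch r).2.length ≤ r.length := by
  intro r
  induction r with
  | nil => intro batch; simp [innerA]
  | cons x r ih =>
      intro batch
      simp only [innerA]
      split
      · exact Nat.le_succ_of_le (ih (batch ++ [x]))
      · simp

-- outer while loop of A
def outerA (bs : Int) : List (List (String × Int)) → List (List (List (String × Int)))
  | [] => []
  | e :: rest =>
      (innerA bs (getLenPy e) [e] rest).1 :: outerA bs (innerA bs (getLenPy e) [e] rest).2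
termination_by l => l.length
decreasing_by
  simp only [List.length_cons]
  exact Nat.lt_succ_of_le (innerA_snd_le _ _ rest [e])

def iter_same_length_batches_py (examples : List (List (String × Int))) (batch_size : Int) :
    List (List (List (String × Int))) :=
  outerA batch_size examples

-- ===== PORT B =====
-- phase-1 loop body of Source B: fold state is (runs, current)
def stepRun (st : List (List (List (String × Int))) × List (List (String × Int)))
    (ex : List (String × Int)) :
    List (List (List (String × Int))) × List (List (String × Int)) :=
  match st with
  | (runs, current) =>
      match current with
      | [] => (runs, [ex])
      | c0 :: _ =>
          if getLenPy c0 = getLenPy ex then (runs, current ++ [ex])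
          else (runs ++ [current], [ex])

-- phase-2 loop of Source B: run[i:i+batch_size] for i in range(0, len(run), batch_size)
-- (range with a non-positive step is empty / raises, so it yields no chunk then)
def chunksB (bs : Int) : List (List (String × Int)) → List (List (List (String × Int)))
  | [] => []
  | e :: r =>
      if bs ≤ 0 then []
      else (e :: r.take (bs - 1).toNat) :: chunksB bs (r.drop (bs - 1).toNat)
termination_by l => l.length
decreasing_by
  simp only [List.length_cons, List.length_drop]
  omega

def iter_same_length_batches_py_alt (examples : List (List (String × Int))) (batch_size : Int) :
    List (List (List (String × Int))) :=
  let st := examples.foldl stepRun ([], [])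
  let runs := if st.2.isEmpty then st.1 else st.1 ++ [st.2]
  runs.flatMap (chunksB batch_size)

-- ===== PRECONDITION & SPEC =====
-- Pre_ excludes (a) examples missing the "length" key, where A raises KeyError, and
-- (b) batch_size < 1, where A's singleton batches are an accident of its inner-loop guard
-- (len(batch) < batch_size is false at once) while B's range-based slicing raises
-- ValueError (step 0) or yields nothing (negative step) — a degenerate, unspecified corner.
def Pre_iter_same_length_batches_py (examples : List (List (String × Int))) (batch_size : Int) : Prop :=
  examples.all (fun e => e.any (fun kv => kv.1 == "length")) = true ∧ 1 ≤ batch_size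
instance (examples : List (List (String × Int))) (batch_size : Int) :
    Decidable (Pre_iter_same_length_batches_py examples batch_size) := by
  unfold Pre_iter_same_length_batches_py; infer_instance

def pvWitness_iter_same_length_batches_py : (List (List (String × Int))) × Int :=
  ([[("length", 3)], [("length", 3)], [("length", 5)]], 2)

def Spec_iter_same_length_batches_py (examples : List (List (String × Int))) (batch_size : Int)
    (out : List (List (List (String × Int)))) : Prop :=
  out = iter_same_length_batches_py_alt examples batch_size
instance (examples : List (List (String × Int))) (batch_size : Int)
    (out : List (List (List (String × Int)))) :
    Decidable (Spec_iter_same_length_batches_py examples batch_size out) := by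
  unfold Spec_iter_same_length_batches_py; infer_instance

-- ===== CLAIM (what is proved, stated in full; the proofs are below) =====
def Claim_equal_iter_same_length_batches_py : Prop := ∀ (examples : List (List (String × Int))) (batch_size : Int), Dom_iter_same_length_batches_py examples batch_size → Pre_iter_same_length_batches_py examples batch_size → Spec_iter_same_length_batches_py examples batch_size (iter_same_length_batches_py examples batch_size)

-- ===== LEMMAS AND PROOFS =====
-- span-style grouping into maximal runs of equal getLenPy (proof-side normal form)
def pLen (cl : Option Int) (x : List (String × Int)) : Bool := getLenPy x == cl

def groupsS : List (List (String × Int)) → List (List (List (String × Int)))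
  | [] => []
  | e :: r =>
      (e :: r.takeWhile (pLen (getLenPy e))) :: groupsS (r.dropWhile (pLen (getLenPy e)))
termination_by l => l.length
decreasing_by
  simp only [List.length_cons]
  exact Nat.lt_succ_of_le (List.length_dropWhile_le _ _)

theorem foldRun_eq :
    ∀ (l : List (List (String × Int))) (runs : List (List (List (String × Int))))
      (c0 : List (String × Int)) (c : List (List (String × Int))),
      (let st := l.foldl stepRun (runs, c0 :: c);
       if st.2.isEmpty then st.1 else st.1 ++ [st.2]) =
      runs ++ (((c0 :: c) ++ l.takeWhile (pLen (getLenPy c0))) ::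
        groupsS (l.dropWhile (pLen (getLenPy c0)))) := by
  intro l
  induction l with
  | nil => intro runs c0 c; simp [groupsS]
  | cons x r ih =>
      intro runs c0 c
      simp only [List.foldl_cons, stepRun]
      by_cases hx : getLenPy c0 = getLenPy x
      · rw [if_pos hx]
        have hpx : pLen (getLenPy c0) x = true := by simp [pLen, hx]
        have := ih runs c0 (c ++ [x])
        simp only [List.cons_append] at this ⊢
        rw [List.takeWhile_cons_of_pos hpx, List.dropWhile_cons_of_pos hpx]
        simpa using this
      · rw [if_neg hx]
        have hpx : pLen (getLenPy c0) x = false := by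
          simp [pLen]; exact fun hc => (hx hc.symm).elim
        have := ih (runs ++ [c0 :: c]) x []
        rw [List.takeWhile_cons_of_neg (by simp [hpx]), List.dropWhile_cons_of_neg (by simp [hpx])]
        rw [this]
        simp [groupsS]

theorem alt_eq_groups (examples : List (List (String × Int))) (bs : Int) :
    iter_same_length_batches_py_alt examples bs = (groupsS examples).flatMap (chunksB bs) := by
  cases examples with
  | nil => simp [iter_same_length_batches_py_alt, groupsS]
  | cons e rest =>
      simp only [iter_same_length_batches_py_alt, List.foldl_cons, stepRun]
      rw [show (List.foldl stepRun (([], [e])) rest) = rest.foldl stepRun (([], [e])) from rfl]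
      have h := foldRun_eq rest [] e []
      simp only [List.nil_append] at h
      rw [h]
      simp [groupsS]

theorem innerA_eq (bs : Int) (cl : Option Int) :
    ∀ (r acc : List (List (String × Int))),
      innerA bs cl acc r =
        (acc ++ (r.takeWhile (pLen cl)).take (bs - acc.length).toNat,
         (r.takeWhile (pLen cl)).drop (bs - acc.length).toNat ++ r.dropWhile (pLen cl)) := by
  intro r
  induction r with
  | nil => intro acc; simp [innerA]
  | cons x t ih =>
      intro acc
      simp only [innerA]
      by_cases hlt : (acc.length : Int) < bs
      · by_cases hx : getLenPy x = cl
        · rw [if_pos ⟨hlt, hx⟩]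
          have hpx : pLen cl x = true := by simp [pLen, hx]
          rw [ih (acc ++ [x])]
          rw [List.takeWhile_cons_of_pos hpx, List.dropWhile_cons_of_pos hpx]
          have hm : (bs - (acc.length : Int)).toNat = (bs - ((acc ++ [x]).length : Int)).toNat + 1 := by
            simp only [List.length_append, List.length_cons, List.length_nil]
            omega
          rw [hm]
          simp [List.take_succ_cons, List.drop_succ_cons]
        · rw [if_neg (by tauto)]
          have hpx : pLen cl x = false := by simp [pLen, hx]
          rw [List.takeWhile_cons_of_neg (by simp [hpx]), List.dropWhile_cons_of_neg (by simp [hpx])]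
          simp
      · rw [if_neg (by tauto)]
        have hm : (bs - (acc.length : Int)).toNat = 0 := by omega
        rw [hm]
        simp [List.takeWhile_append_dropWhile]

-- absorbing a run prefix: outerA over (g ++ tail) where all of g has length cl and tail's head does not
theorem outerA_absorb (bs : Int) (hbs : 1 ≤ bs) (cl : Option Int) :
    ∀ (g tail : List (List (String × Int))),
      (∀ x ∈ g, pLen cl x = true) →
      (∀ h : tail ≠ [], pLen cl (tail.head h) = false) →
      outerA bs (g ++ tail) = chunksB bs g ++ outerA bs tail := by
  intro g
  induction hn : g.length using Nat.strong_induction_on generalizing g with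
  | _ n ih =>
      intro tail hg htail
      cases g with
      | nil => simp [chunksB]
      | cons g0 g' =>
          have hg0 : getLenPy g0 = cl := by
            have := hg g0 (by simp)
            simpa [pLen] using this
          have htail' : tail.takeWhile (pLen cl) = [] ∧ tail.dropWhile (pLen cl) = tail := by
            cases tail with
            | nil => simp
            | cons t0 ts =>
                have ht0 : pLen cl t0 = false := by simpa using htail (by simp)
                exact ⟨List.takeWhile_cons_of_neg (by simp [ht0]),
                       List.dropWhile_cons_of_neg (by simp [ht0])⟩
          have hallg : ∀ x ∈ g', pLen cl x = true :=
            fun x hx => hg x (List.mem_cons_of_mem _ hx)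
          have htw : (g' ++ tail).takeWhile (pLen cl) = g' := by
            rw [List.takeWhile_append]
            have hall : g'.takeWhile (pLen cl) = g' := List.takeWhile_eq_self_iff.mpr hallg
            rw [if_pos (by rw [hall]), htail'.1, List.append_nil]
          have hdw : (g' ++ tail).dropWhile (pLen cl) = tail := by
            rw [List.dropWhile_append]
            have hall : g'.dropWhile (pLen cl) = [] := List.dropWhile_eq_nil_iff.mpr hallg
            rw [if_pos (by rw [hall]; rfl), htail'.2]
          rw [List.cons_append, outerA, hg0, innerA_eq]
          simp only [htw, hdw, List.length_cons, List.length_nil]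
          simp only [List.length_cons] at hn
          have hrec := ih ((g'.drop (bs - 1).toNat).length)
            (by simp only [List.length_drop]; omega)
            (g'.drop (bs - 1).toNat) rfl
            tail (fun x hx => hg x (List.mem_cons_of_mem _ (List.mem_of_mem_drop hx))) htail
          simp only [Nat.zero_add, Nat.cast_one]
          rw [hrec, chunksB, if_neg (by omega)]
          simp

theorem outerA_eq_groups (bs : Int) (hbs : 1 ≤ bs) :
    ∀ (l : List (List (String × Int))),
      outerA bs l = (groupsS l).flatMap (chunksB bs) := by
  intro l
  induction hn : l.length using Nat.strong_induction_on generalizing l with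
  | _ n ih =>
      cases l with
      | nil => simp [outerA, groupsS]
      | cons e rest =>
          rw [outerA, innerA_eq]
          set cl := getLenPy e with hcl
          set tw := rest.takeWhile (pLen cl) with htw
          set dw := rest.dropWhile (pLen cl) with hdw
          simp only [List.length_cons, List.length_nil]
          have habs : outerA bs (tw.drop (bs - 1).toNat ++ dw) =
              chunksB bs (tw.drop (bs - 1).toNat) ++ outerA bs dw := by
            apply outerA_absorb bs hbs cl
            · intro x hx
              exact List.mem_takeWhile_imp (List.mem_of_mem_drop hx)
            · intro h
              have := List.head_dropWhile_not (pLen cl) (l := rest) (by rwa [← hdw])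
              simpa using this
          have hdwlen : dw.length < (e :: rest).length := by
            simp only [List.length_cons]
            exact Nat.lt_succ_of_le (List.length_dropWhile_le _ _)
          simp only [Nat.zero_add, Nat.cast_one]
          rw [habs, ih dw.length (by simp only [List.length_cons] at hn hdwlen; omega) dw rfl]
          rw [groupsS]
          simp only [List.flatMap_cons]
          rw [chunksB, if_neg (by omega)]
          simp [htw, hdw, hcl]

-- ===== VERDICT (by name: the statement is the Claim_ definition above) =====
theorem iter_same_length_batches_py_spec : Claim_equal_iter_same_length_batches_py := by
  intro examples batch_size _ hpre
  unfold Spec_iter_same_length_batches_py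
  rw [iter_same_length_batches_py, outerA_eq_groups batch_size hpre.2, alt_eq_groups]
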